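-- pv_equiv track=rewrite | github.com/pblumenkamp/Curare | curare/curare.py | check_string_validity
-- ===== SOURCE A (Python) =====
-- from typing import Dict, List, Tuple, Any, Optional
--
-- def check_string_validity(string: str, character_set: List[str]) -> Tuple[bool, Optional[str]]:
--     character_set = character_set.copy()
--     if 'A-Z' in character_set:
--         del character_set[character_set.index('A-Z')]
--         character_set.extend([chr(x) for x in range(65, 91)])
--     if 'a-z' in character_set:
--         del character_set[character_set.index('a-z')]
--         character_set.extend([chr(x) for x in range(97, 123)])
--     if '0-9' in character_set:
--         del character_set[character_set.index('0-9')]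
--         character_set.extend([chr(x) for x in range(48, 58)])
--     for character in string:
--         if character not in character_set:
--             return False, character
--     return True, None
-- ===== SOURCE B (Python) =====
-- from typing import List, Tuple, Optional
--
-- def check_string_validity(string: str, character_set: List[str]) -> Tuple[bool, Optional[str]]:
--     has_upper = 'A-Z' in character_set
--     has_lower = 'a-z' in character_set
--     has_digit = '0-9' in character_set
--     literals = set(character_set)
--     for character in string:
--         o = ord(character)
--         if character in literals:
--             continue
--         if has_upper and 65 <= o <= 90:
--             continue
--         if has_lower and 97 <= o <= 122:
--             continue
--         if has_digit and 48 <= o <= 57: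
--             continue
--         return False, character
--     return True, None
-- ===== Notes on version B (the rewrite author's own statement) =====
-- stated objective: faster
-- what changed: Instead of copying the list and materialising the expanded ranges into it and scanning that list for every character, B precomputes three range flags and a hash set of the literal tokens once, testing each character by O(1) set lookup and ordinal comparisons.
import Mathlib
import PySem

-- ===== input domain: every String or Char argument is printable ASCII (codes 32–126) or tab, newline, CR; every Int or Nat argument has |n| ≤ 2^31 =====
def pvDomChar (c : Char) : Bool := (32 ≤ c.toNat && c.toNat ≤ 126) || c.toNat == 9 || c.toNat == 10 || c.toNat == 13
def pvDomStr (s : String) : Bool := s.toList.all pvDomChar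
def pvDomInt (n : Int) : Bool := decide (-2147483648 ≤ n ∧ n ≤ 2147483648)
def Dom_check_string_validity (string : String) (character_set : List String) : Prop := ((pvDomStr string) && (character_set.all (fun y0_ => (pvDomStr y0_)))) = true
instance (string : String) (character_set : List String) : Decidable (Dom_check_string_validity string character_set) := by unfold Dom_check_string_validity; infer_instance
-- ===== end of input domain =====

-- B replaces A's copy-and-expand of the range tokens into the list by three range flags
-- plus a set of the literal tokens, testing each character by ordinal comparisons (simpler).

-- ===== PORT A =====
-- chr(x) for the range(...) expansions
def pvChr (x : Int) : String := String.ofList [Char.ofNat x.toNat]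

-- one 'if tok in cs: del cs[cs.index(tok)]; cs.extend([chr(x) for x in range(lo, hi)])' step;
-- 'del cs[cs.index(tok)]' removes the first occurrence of tok, i.e. cs.erase tok
def pvExpand (cs : List String) (tok : String) (lo hi : Int) : List String :=
  if tok ∈ cs then cs.erase tok ++ (PySem.List.pyRange lo hi 1).map pvChr else cs

-- 'for character in string: if character not in character_set: return False, character'
def pvLoopA : List Char → List String → Bool × Option String
  | [], _ => (true, none)
  | c :: rest, cs =>
    if String.ofList [c] ∉ cs then (false, some (String.ofList [c])) else pvLoopA rest cs

def check_string_validity (string : String) (character_set : List String) : Bool × Option String :=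
  pvLoopA string.toList
    (pvExpand (pvExpand (pvExpand character_set "A-Z" 65 91) "a-z" 97 123) "0-9" 48 58)

-- ===== PORT B =====
def pvOkB (hasU hasL hasD : Bool) (lits : PySem.Set String) (c : Char) : Bool :=
  let o : Int := (c.toNat : Int)
  (String.ofList [c]) ∈ lits
    || (hasU && decide (65 ≤ o ∧ o ≤ 90))
    || (hasL && decide (97 ≤ o ∧ o ≤ 122))
    || (hasD && decide (48 ≤ o ∧ o ≤ 57))

def pvLoopB (ok : Char → Bool) : List Char → Bool × Option String
  | [] => (true, none)
  | c :: rest => if ok c then pvLoopB ok rest else (false, some (String.ofList [c]))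

def check_string_validity_alt (string : String) (character_set : List String) : Bool × Option String :=
  let hasU := "A-Z" ∈ character_set
  let hasL := "a-z" ∈ character_set
  let hasD := "0-9" ∈ character_set
  let lits := PySem.Set.ofList character_set
  pvLoopB (pvOkB hasU hasL hasD lits) string.toList

-- ===== PRECONDITION & SPEC =====
def Spec_check_string_validity (string : String) (character_set : List String) (out : Bool × Option String) : Prop := out = check_string_validity_alt string character_set
instance (string : String) (character_set : List String) (out : Bool × Option String) : Decidable (Spec_check_string_validity string character_set out) := by unfold Spec_check_string_validity; infer_instance

-- ===== CLAIM (what is proved, stated in full; the proofs are below) =====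
def Claim_equal_check_string_validity : Prop := ∀ (string : String) (character_set : List String), Dom_check_string_validity string character_set → Spec_check_string_validity string character_set (check_string_validity string character_set)

-- ===== LEMMAS AND PROOFS =====

-- single-char strings differ from the three-char range tokens
theorem pv_single_ne (c : Char) (a b d : Char) : String.ofList [c] ≠ String.ofList [a, b, d] := by
  intro h; have := congrArg String.toList h; simp at this

-- membership of a single-char string in the expanded range list ↔ ordinal bounds
theorem pv_mem_range_map (c : Char) (lo hi : Int) (h0 : 0 ≤ lo) (h1 : hi ≤ 1000) :
    (String.ofList [c] ∈ (PySem.List.pyRange lo hi 1).map pvChr)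
      ↔ (lo ≤ (c.toNat : Int) ∧ (c.toNat : Int) < hi) := by
  simp only [List.mem_map, PySem.List.mem_pyRange_one]
  constructor
  · rintro ⟨x, ⟨hx1, hx2⟩, hx⟩
    have hc : Char.ofNat x.toNat = c := by
      have := congrArg String.toList hx; simp [pvChr] at this; exact this
    have hxn : (Char.ofNat x.toNat).toNat = x.toNat := by
      have : x.toNat < 55296 := by omega
      simp [Char.toNat_ofNat, this]
    have : c.toNat = x.toNat := by rw [← hc, hxn]
    omega
  · rintro ⟨hx1, hx2⟩
    refine ⟨(c.toNat : Int), ⟨hx1, hx2⟩, ?_⟩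
    simp [pvChr, Char.ofNat_toNat]

-- a three-char token's membership is unaffected by an expansion step
theorem pv_tok_mem_expand (cs : List String) (tok tok' : String) (lo hi : Int)
    (a b d : Char) (h' : tok' = String.ofList [a, b, d]) (hne : tok' ≠ tok) :
    (tok' ∈ pvExpand cs tok lo hi ↔ tok' ∈ cs) := by
  unfold pvExpand
  split_ifs with hmem
  · simp only [List.mem_append]
    constructor
    · rintro (h | h)
      · exact (List.mem_erase_of_ne hne).1 h
      · exfalso
        simp only [List.mem_map] at h
        obtain ⟨x, _, hx⟩ := h
        exact pv_single_ne (Char.ofNat x.toNat) a b d (h' ▸ hx)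
    · intro h; exact Or.inl ((List.mem_erase_of_ne hne).2 h)
  · exact Iff.rfl

-- a single-char string's membership after one expansion step
theorem pv_single_mem_expand (cs : List String) (c : Char) (a b d : Char)
    (tok : String) (htok : tok = String.ofList [a, b, d]) (lo hi : Int)
    (h0 : 0 ≤ lo) (h1 : hi ≤ 1000) :
    (String.ofList [c] ∈ pvExpand cs tok lo hi
      ↔ String.ofList [c] ∈ cs ∨ (tok ∈ cs ∧ lo ≤ (c.toNat : Int) ∧ (c.toNat : Int) < hi)) := by
  unfold pvExpand
  split_ifs with hmem
  · simp only [List.mem_append, pv_mem_range_map c lo hi h0 h1,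
      List.mem_erase_of_ne (htok ▸ pv_single_ne c a b d)]
    tauto
  · tauto

-- per-character agreement of the two membership tests
theorem pv_char_agree (cs : List String) (c : Char) :
    (String.ofList [c]
        ∈ pvExpand (pvExpand (pvExpand cs "A-Z" 65 91) "a-z" 97 123) "0-9" 48 58)
      ↔ (pvOkB (decide ("A-Z" ∈ cs)) (decide ("a-z" ∈ cs)) (decide ("0-9" ∈ cs))
          (PySem.Set.ofList cs) c = true) := by
  have e1 := pv_single_mem_expand cs c 'A' '-' 'Z' "A-Z" rfl 65 91 (by norm_num) (by norm_num)
  have e2 := pv_single_mem_expand (pvExpand cs "A-Z" 65 91) c 'a' '-' 'z' "a-z" rfl 97 123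
    (by norm_num) (by norm_num)
  have e3 := pv_single_mem_expand (pvExpand (pvExpand cs "A-Z" 65 91) "a-z" 97 123) c
    '0' '-' '9' "0-9" rfl 48 58 (by norm_num) (by norm_num)
  have t2 : ("a-z" ∈ pvExpand cs "A-Z" 65 91) ↔ "a-z" ∈ cs :=
    pv_tok_mem_expand cs "A-Z" "a-z" 65 91 'a' '-' 'z' rfl (by decide)
  have t3a : ("0-9" ∈ pvExpand cs "A-Z" 65 91) ↔ "0-9" ∈ cs :=
    pv_tok_mem_expand cs "A-Z" "0-9" 65 91 '0' '-' '9' rfl (by decide)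
  have t3 : ("0-9" ∈ pvExpand (pvExpand cs "A-Z" 65 91) "a-z" 97 123)
      ↔ "0-9" ∈ cs := by
    rw [pv_tok_mem_expand _ "a-z" "0-9" 97 123 '0' '-' '9' rfl (by decide)]; exact t3a
  rw [e3, e2, t3, t2, e1]
  simp only [pvOkB, PySem.Set.mem_ofList, Bool.or_eq_true, Bool.and_eq_true,
    decide_eq_true_eq]
  constructor
  · rintro (((h | h) | h) | h) <;> [exact Or.inl (Or.inl (Or.inl h));
      exact Or.inl (Or.inl (Or.inr ⟨h.1, by omega⟩));
      exact Or.inl (Or.inr ⟨h.1, by omega⟩);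
      exact Or.inr ⟨h.1, by omega⟩]
  · rintro (((h | h) | h) | h) <;> [exact Or.inl (Or.inl (Or.inl h));
      exact Or.inl (Or.inl (Or.inr ⟨h.1, by omega⟩));
      exact Or.inl (Or.inr ⟨h.1, by omega⟩);
      exact Or.inr ⟨h.1, by omega⟩]

-- the two loops agree whenever the per-character tests agree
theorem pv_loops_agree (l : List Char) (cs' : List String) (ok : Char → Bool)
    (h : ∀ c, (String.ofList [c] ∈ cs') ↔ ok c = true) :
    pvLoopA l cs' = pvLoopB ok l := by
  induction l with
  | nil => rfl
  | cons c rest ih =>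
    simp only [pvLoopA, pvLoopB]
    by_cases hc : ok c = true
    · rw [if_neg (by simp [(h c).2 hc]), if_pos hc]; exact ih
    · rw [if_pos (by intro hm; exact hc ((h c).1 hm)), if_neg hc]

-- ===== VERDICT (by name: the statement is the Claim_ definition above) =====
theorem check_string_validity_spec : Claim_equal_check_string_validity := by
  intro s cs _
  unfold Spec_check_string_validity check_string_validity check_string_validity_alt
  exact pv_loops_agree s.toList _ _ (fun c => pv_char_agree cs c)
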